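-- pv_equiv track=rewrite | github.com/FranRovi/Algorithms | Leet_Code/Easy/filterCharactersByFrequency.py | filterCharacters
-- ===== SOURCE A (Python) =====
-- def filterCharacters(s, k):
--     if k == 1:
--         return ""
--     hash_char_freq = {}
--     invalid_chars = []
--     for char in s:
--         if char not in invalid_chars:
--             if char not in hash_char_freq:
--                 hash_char_freq[char] = 1
--             else:
--                 temp = hash_char_freq[char]
--                 if temp + 1 == k:
--                     invalid_chars.append(char)
--                     del hash_char_freq[char]
--                 else:
--                     hash_char_freq[char] += 1
--     answer = ""
--     for char in s:
--         if char in hash_char_freq: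
--             answer += char
--     return answer
-- ===== SOURCE B (Python) =====
-- def filterCharacters(s, k):
--     return "".join(c for c in s if s.count(c) < k)
-- ===== Notes on version B (the rewrite author's own statement) =====
-- stated objective: simpler
-- what changed: B drops A's frequency-dict/invalid-list state machine and its k==1 special case entirely: it keeps each character of s iff s.count(c) < k, a single filtering comprehension with repeated counting instead of build-index-then-filter.
-- intended difference: For k <= 0 and nonempty s, A returns s unchanged (its 'temp + 1 == k' removal test can never fire since counts start at 1), while B returns '' because every character occurs at least k times; removing all characters is the intended result of 'remove characters occurring k or more times' when k <= 0. — e.g. on filterCharacters("a", 0): A returns "a", B returns ""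
import Mathlib
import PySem

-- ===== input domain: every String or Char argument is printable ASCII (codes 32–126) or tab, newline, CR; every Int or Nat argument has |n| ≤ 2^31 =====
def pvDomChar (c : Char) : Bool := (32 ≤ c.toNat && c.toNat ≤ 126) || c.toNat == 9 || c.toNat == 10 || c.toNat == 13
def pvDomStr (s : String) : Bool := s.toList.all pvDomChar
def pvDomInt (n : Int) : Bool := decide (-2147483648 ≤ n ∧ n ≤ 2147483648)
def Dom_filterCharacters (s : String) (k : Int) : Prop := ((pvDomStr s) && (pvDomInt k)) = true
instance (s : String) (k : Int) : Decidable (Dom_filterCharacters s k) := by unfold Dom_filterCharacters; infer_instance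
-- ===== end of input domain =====

-- B replaces A's frequency-dict/invalid-list state machine (and its k==1 special case) by a
-- single filter keeping c iff s.count(c) < k; for k <= 0 B returns the intended '' where A
-- returns s unchanged (see D_ below). Objective: simpler; not faster (B re-counts per character).

-- ===== PORT A =====
-- one step of A's first loop over the characters of s; state = (hash_char_freq, invalid_chars)
def stepA (k : Int) (st : PySem.Dict Char Int × List Char) (c : Char) :
    PySem.Dict Char Int × List Char :=
  if st.2.contains c then st
  else
    match st.1.get? c with
    | none => (st.1.insert c 1, st.2)
    | some t =>
      if t + 1 = k then (st.1.erase c, st.2 ++ [c])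
      else (st.1.insert c (t + 1), st.2)

def filterCharacters (s : String) (k : Int) : String :=
  if k = 1 then ""
  else
    let st := s.toList.foldl (stepA k) (PySem.Dict.empty, [])
    String.ofList (s.toList.foldl (fun acc c => if st.1.contains c then acc ++ [c] else acc) [])

-- ===== PORT B =====
def filterCharacters_alt (s : String) (k : Int) : String :=
  String.ofList (s.toList.filter (fun c => decide ((s.toList.count c : Int) < k)))

-- ===== PRECONDITION & SPEC =====
-- For k <= 0 and nonempty s, A returns s unchanged (its 'temp + 1 == k' removal test never
-- fires), while B returns "" because every character then occurs at least k times; "" is the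
-- intended value of 'remove characters occurring k or more times' when k <= 0.
def D_filterCharacters (s : String) (k : Int) : Prop := k ≤ 0 ∧ s ≠ ""
instance (s : String) (k : Int) : Decidable (D_filterCharacters s k) := by
  unfold D_filterCharacters; infer_instance

def Spec_filterCharacters (s : String) (k : Int) (out : String) : Prop :=
  ¬ D_filterCharacters s k → out = filterCharacters_alt s k
instance (s : String) (k : Int) (out : String) : Decidable (Spec_filterCharacters s k out) := by
  unfold Spec_filterCharacters; infer_instance

def pvDiffWitness_filterCharacters : String × Int := ("a", 0)
def pvDiffWitnessOut_filterCharacters : String × String := ("a", "")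

-- ===== CLAIM (what is proved, stated in full; the proofs are below) =====
def Claim_unchanged_filterCharacters : Prop :=
  ∀ (s : String) (k : Int), Dom_filterCharacters s k →
    Spec_filterCharacters s k (filterCharacters s k)
def Claim_changed_filterCharacters : Prop :=
  Dom_filterCharacters (pvDiffWitness_filterCharacters.1) (pvDiffWitness_filterCharacters.2) ∧
  D_filterCharacters (pvDiffWitness_filterCharacters.1) (pvDiffWitness_filterCharacters.2) ∧
  filterCharacters (pvDiffWitness_filterCharacters.1) (pvDiffWitness_filterCharacters.2) =
    pvDiffWitnessOut_filterCharacters.1 ∧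
  filterCharacters_alt (pvDiffWitness_filterCharacters.1) (pvDiffWitness_filterCharacters.2) =
    pvDiffWitnessOut_filterCharacters.2 ∧
  pvDiffWitnessOut_filterCharacters.1 ≠ pvDiffWitnessOut_filterCharacters.2
def Claim_exact_filterCharacters : Prop :=
  ∀ (s : String) (k : Int), Dom_filterCharacters s k → D_filterCharacters s k →
    filterCharacters s k ≠ filterCharacters_alt s k

-- ===== LEMMAS AND PROOFS =====

theorem get?_erase (d : PySem.Dict Char Int) (k c : Char) :
    (d.erase k).get? c = if c = k then none else d.get? c := by
  rcases d with ⟨items⟩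
  induction items with
  | nil => simp [PySem.Dict.erase, PySem.Dict.get?]
  | cons p rest ih =>
    simp only [PySem.Dict.erase, PySem.Dict.get?] at *
    by_cases h1 : p.1 = k <;> by_cases h2 : p.1 = c <;> simp_all [beq_iff_eq]

-- loop invariant of A's first pass: n is the number of occurrences of c consumed so far
def InvA (k : Int) (n : Nat) (st : PySem.Dict Char Int × List Char) (c : Char) : Prop :=
  (st.1.get? c = if 1 ≤ n ∧ (k ≤ 0 ∨ (n : Int) < k) then some (n : Int) else none) ∧
  (st.2.contains c = true ↔ 2 ≤ k ∧ k ≤ (n : Int))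

theorem stepA_inv (k : Int) (hk : k ≠ 1) (st : PySem.Dict Char Int × List Char) (x : Char)
    (cnt : Char → Nat) (h : ∀ c, InvA k (cnt c) st c) :
    ∀ c, InvA k (cnt c + (if c = x then 1 else 0)) (stepA k st x) c := by
  intro c
  obtain ⟨hx1, hx2⟩ := h x
  obtain ⟨hc1, hc2⟩ := h c
  by_cases hcx : c = x
  · subst hcx
    rw [if_pos rfl]
    by_cases hm : st.2.contains c = true
    · have hstep : stepA k st c = st := by unfold stepA; rw [if_pos hm]
      have hk2 : 2 ≤ k ∧ k ≤ (cnt c : Int) := hc2.mp hm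
      rw [hstep]
      refine ⟨?_, ?_⟩
      · rw [hc1, if_neg (by omega), if_neg (by push_cast; omega)]
      · rw [hc2]; push_cast; omega
    · have hninv : ¬ (2 ≤ k ∧ k ≤ (cnt c : Int)) := fun hcon => hm (hc2.mpr hcon)
      cases hg : st.1.get? c with
      | none =>
        have hstep : stepA k st c = (st.1.insert c 1, st.2) := by
          unfold stepA; rw [if_neg hm, hg]
        have hno : ¬ (1 ≤ cnt c ∧ (k ≤ 0 ∨ (cnt c : Int) < k)) := by
          intro hcon; rw [hc1, if_pos hcon] at hg; simp at hg
        have hn0 : cnt c = 0 := by omega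
        rw [hstep]
        refine ⟨?_, ?_⟩
        · show (st.1.insert c 1).get? c = _
          rw [PySem.Dict.get?_insert_self, if_pos (by omega), hn0]
          norm_num
        · show st.2.contains c = true ↔ _
          rw [hc2]; omega
      | some t =>
        rw [hc1] at hg
        by_cases hcond : 1 ≤ cnt c ∧ (k ≤ 0 ∨ (cnt c : Int) < k)
        · rw [if_pos hcond] at hg
          have ht : ((cnt c : Int)) = t := Option.some.inj hg
          by_cases hkk : t + 1 = k
          · have hstep : stepA k st c = (st.1.erase c, st.2 ++ [c]) := by
              unfold stepA
              rw [if_neg hm]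
              have : st.1.get? c = some t := by rw [hc1, if_pos hcond, ht]
              rw [this]
              dsimp only
              rw [if_pos hkk]
            rw [hstep]
            refine ⟨?_, ?_⟩
            · show (st.1.erase c).get? c = _
              rw [get?_erase, if_pos rfl, if_neg (by push_cast; omega)]
            · show ((st.2 ++ [c]).contains c) = true ↔ _
              have hmem : ((st.2 ++ [c]).contains c) = true := by simp
              rw [hmem]
              constructor
              · intro _; push_cast; omega
              · intro _; rfl
          · have hstep : stepA k st c = (st.1.insert c (t + 1), st.2) := by
              unfold stepA
              rw [if_neg hm]
              have : st.1.get? c = some t := by rw [hc1, if_pos hcond, ht]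
              rw [this]
              dsimp only
              rw [if_neg hkk]
            rw [hstep]
            refine ⟨?_, ?_⟩
            · show (st.1.insert c (t + 1)).get? c = _
              have hcnd2 : 1 ≤ cnt c + 1 ∧ (k ≤ 0 ∨ ((cnt c + 1 : Nat) : Int) < k) := by
                obtain ⟨h1, h2⟩ := hcond
                refine ⟨by omega, ?_⟩
                rcases h2 with h2 | h2
                · exact Or.inl h2
                · right; push_cast at ht ⊢; omega
              rw [PySem.Dict.get?_insert_self, if_pos hcnd2]
              rw [← ht]; push_cast; ring_nf
            · show st.2.contains c = true ↔ _
              rw [hc2]; push_cast; omega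
        · rw [if_neg hcond] at hg; simp at hg
  · rw [if_neg hcx, Nat.add_zero]
    by_cases hm : st.2.contains x = true
    · have hstep : stepA k st x = st := by unfold stepA; rw [if_pos hm]
      rw [hstep]; exact ⟨hc1, hc2⟩
    · cases hg : st.1.get? x with
      | none =>
        have hstep : stepA k st x = (st.1.insert x 1, st.2) := by
          unfold stepA; rw [if_neg hm, hg]
        rw [hstep]
        exact ⟨by rw [show (st.1.insert x 1, st.2).1 = st.1.insert x 1 from rfl,
          PySem.Dict.get?_insert, if_neg hcx, hc1], hc2⟩
      | some t =>
        by_cases hkk : t + 1 = k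
        · have hstep : stepA k st x = (st.1.erase x, st.2 ++ [x]) := by
            unfold stepA; rw [if_neg hm, hg]; dsimp only; rw [if_pos hkk]
          rw [hstep]
          refine ⟨?_, ?_⟩
          · show (st.1.erase x).get? c = _
            rw [get?_erase, if_neg hcx, hc1]
          · show ((st.2 ++ [x]).contains c) = true ↔ _
            have : ((st.2 ++ [x]).contains c) = st.2.contains c := by
              simp [hcx]
            rw [this, hc2]
        · have hstep : stepA k st x = (st.1.insert x (t + 1), st.2) := by
            unfold stepA; rw [if_neg hm, hg]; dsimp only; rw [if_neg hkk]
          rw [hstep]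
          exact ⟨by rw [show (st.1.insert x (t + 1), st.2).1 = st.1.insert x (t + 1) from rfl,
            PySem.Dict.get?_insert, if_neg hcx, hc1], hc2⟩

theorem foldl_inv (k : Int) (hk : k ≠ 1) :
    ∀ (l : List Char) (st : PySem.Dict Char Int × List Char) (cnt : Char → Nat),
      (∀ c, InvA k (cnt c) st c) →
      ∀ c, InvA k (cnt c + l.count c) (l.foldl (stepA k) st) c := by
  intro l
  induction l with
  | nil => intro st cnt h c; simpa using h c
  | cons x xs ih =>
    intro st cnt h c
    have h' := ih (stepA k st x) (fun c => cnt c + (if c = x then 1 else 0))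
      (stepA_inv k hk st x cnt h) c
    have hcount : (x :: xs).count c = xs.count c + (if c = x then 1 else 0) := by
      by_cases hcx : c = x
      · subst hcx; simp
      · simp [Ne.symm hcx, hcx]
    rw [List.foldl_cons, hcount, show cnt c + (xs.count c + (if c = x then 1 else 0)) =
      (cnt c + (if c = x then 1 else 0)) + xs.count c by omega]
    exact h'


theorem toList_ofList (l : List Char) : (String.ofList l).toList = l :=
  Eq.symm (String.ofList_eq.mp rfl)

-- characterisation of A's dict after the first pass: c is a key iff 0 < count ∧ (count < k or k ≤ 0)
theorem contains_final (s : String) (k : Int) (hk : k ≠ 1) (c : Char) :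
    ((s.toList.foldl (stepA k) (PySem.Dict.empty, [])).1.contains c) =
      decide (1 ≤ s.toList.count c ∧ (k ≤ 0 ∨ (s.toList.count c : Int) < k)) := by
  have hbase : ∀ c, InvA k 0 ((PySem.Dict.empty : PySem.Dict Char Int), ([] : List Char)) c := by
    intro c
    constructor
    · show (PySem.Dict.empty : PySem.Dict Char Int).get? c = _
      rw [PySem.Dict.get?_empty, if_neg (by rintro ⟨h1, _⟩; omega)]
    · show (([] : List Char).contains c) = true ↔ _
      constructor
      · intro h; simp at h
      · rintro ⟨h1, h2⟩; omega
  have hinv := foldl_inv k hk s.toList (PySem.Dict.empty, []) (fun _ => 0) hbase c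
  simp only [Nat.zero_add] at hinv
  obtain ⟨h1, _⟩ := hinv
  rw [PySem.Dict.contains_eq_isSome_get?, h1]
  by_cases hcond : 1 ≤ s.toList.count c ∧ (k ≤ 0 ∨ (s.toList.count c : Int) < k)
  · rw [if_pos hcond, decide_eq_true hcond]; rfl
  · rw [if_neg hcond, decide_eq_false hcond]; rfl

-- A with k ≠ 1 is a filter by key-membership in the final dict
theorem filterA_eq_filter (s : String) (k : Int) (hk : k ≠ 1) :
    filterCharacters s k = String.ofList (s.toList.filter
      (fun c => (s.toList.foldl (stepA k) (PySem.Dict.empty, [])).1.contains c)) := by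
  unfold filterCharacters
  rw [if_neg hk]
  show String.ofList (s.toList.foldl
    (fun acc c => if (s.toList.foldl (stepA k) (PySem.Dict.empty, [])).1.contains c
      then acc ++ [c] else acc) []) = _
  rw [PySem.List.foldl_append_if_eq_filter]
  rw [List.nil_append]

theorem count_pos_of_mem {l : List Char} {c : Char} (h : c ∈ l) : 1 ≤ l.count c :=
  List.count_pos_iff.mpr h

-- ===== VERDICT (by name: the statement is the Claim_ definition above) =====
theorem filterCharacters_spec : Claim_unchanged_filterCharacters := by
  intro s k _ hnd
  unfold D_filterCharacters at hnd
  push_neg at hnd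
  by_cases hs : s = ""
  · subst hs
    unfold filterCharacters filterCharacters_alt
    by_cases hk : k = 1
    · rw [if_pos hk]; rfl
    · rw [if_neg hk]; rfl
  · have hk1 : 1 ≤ k := by
      have := hnd
      by_contra hlt
      exact hs (this (by omega))
    by_cases hk : k = 1
    · subst hk
      unfold filterCharacters filterCharacters_alt
      rw [if_pos rfl]
      have hnil : s.toList.filter (fun c => decide ((s.toList.count c : Int) < 1)) = [] := by
        rw [List.filter_eq_nil_iff]
        intro c hc
        have := count_pos_of_mem hc
        simp only [decide_eq_true_eq, not_lt]
        exact_mod_cast this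
      rw [hnil]
    · have hk2 : 2 ≤ k := by omega
      rw [filterA_eq_filter s k hk]
      unfold filterCharacters_alt
      congr 1
      apply List.filter_congr
      intro c hc
      rw [contains_final s k hk c]
      have hpos := count_pos_of_mem hc
      by_cases hlt : (s.toList.count c : Int) < k
      · rw [decide_eq_true (by exact ⟨hpos, Or.inr hlt⟩), decide_eq_true hlt]
      · rw [decide_eq_false (by rintro ⟨_, h | h⟩ <;> omega), decide_eq_false hlt]

theorem filterCharacters_changed : Claim_changed_filterCharacters := by
  unfold Claim_changed_filterCharacters; decide

theorem filterCharacters_tight : Claim_exact_filterCharacters := by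
  intro s k _ hd
  obtain ⟨hk0, hs⟩ := hd
  have hk : k ≠ 1 := by omega
  rw [filterA_eq_filter s k hk]
  unfold filterCharacters_alt
  have hA : s.toList.filter
      (fun c => (s.toList.foldl (stepA k) (PySem.Dict.empty, [])).1.contains c) = s.toList := by
    rw [List.filter_eq_self]
    intro c hc
    rw [contains_final s k hk c]
    exact decide_eq_true ⟨count_pos_of_mem hc, Or.inl hk0⟩
  have hB : s.toList.filter (fun c => decide ((s.toList.count c : Int) < k)) = [] := by
    rw [List.filter_eq_nil_iff]
    intro c hc
    have := count_pos_of_mem hc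
    simp only [decide_eq_true_eq, not_lt]
    omega
  rw [hA, hB]
  intro hcon
  have := congrArg String.toList hcon
  rw [toList_ofList, toList_ofList] at this
  exact (by simpa [String.toList_eq_nil_iff] using this : s = "") |> hs
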